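-- pv_equiv track=rewrite | github.com/Lazaruz-Bologon/CrossLineGame | utils.py | check_edge_crossing
-- ===== SOURCE A (Python) =====
-- def get_edge(pos1, pos2):
--     if pos1 > pos2:
--         pos1, pos2 = pos2, pos1
--     return (pos1, pos2)
--
-- def check_edge_crossing(path1, path2):
--     edges1 = set()
--     for i in range(len(path1) - 1):
--         edges1.add(get_edge(path1[i], path1[i+1]))
--     for i in range(len(path2) - 1):
--         edge = get_edge(path2[i], path2[i+1])
--         if edge in edges1:
--             return True
--     return False
-- ===== SOURCE B (Python) =====
-- def check_edge_crossing(path1, path2):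
--     # Nested double loop over consecutive pairs; no auxiliary edge set.
--     for a, b in zip(path1, path1[1:]):
--         e1 = (a, b) if a <= b else (b, a)
--         for c, d in zip(path2, path2[1:]):
--             e2 = (c, d) if c <= d else (d, c)
--             if e1 == e2:
--                 return True
--     return False
-- ===== Notes on version B (the rewrite author's own statement) =====
-- stated objective: simpler
-- what changed: Drops the auxiliary edge set and index loops: B directly double-scans consecutive pairs of path1 against those of path2 (via zip) and returns on the first matching normalized edge.
import Mathlib
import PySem

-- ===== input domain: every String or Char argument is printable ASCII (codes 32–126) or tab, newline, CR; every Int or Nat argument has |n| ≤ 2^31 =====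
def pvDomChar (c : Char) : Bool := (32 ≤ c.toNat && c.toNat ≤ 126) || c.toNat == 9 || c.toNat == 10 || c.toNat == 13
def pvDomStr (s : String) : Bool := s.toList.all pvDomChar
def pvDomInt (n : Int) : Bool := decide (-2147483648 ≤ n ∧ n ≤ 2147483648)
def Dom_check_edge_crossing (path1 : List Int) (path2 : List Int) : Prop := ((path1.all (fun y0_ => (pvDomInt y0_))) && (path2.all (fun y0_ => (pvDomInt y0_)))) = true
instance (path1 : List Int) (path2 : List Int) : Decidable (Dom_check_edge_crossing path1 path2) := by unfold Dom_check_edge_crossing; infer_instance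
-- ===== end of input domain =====

-- B drops A's auxiliary edge set and index loops: it double-scans consecutive pairs directly (simpler, not faster).

-- ===== PORT A =====
def get_edge (pos1 : Int) (pos2 : Int) : Int × Int :=
  if pos1 > pos2 then (pos2, pos1) else (pos1, pos2)

-- edges1 = set(); for i in range(len(path1)-1): edges1.add(get_edge(path1[i], path1[i+1]))
-- indices i and i+1 are always in range, so pyGetD is exact here
def check_edge_crossing (path1 : List Int) (path2 : List Int) : Bool :=
  let edges1 : PySem.Set (Int × Int) :=
    (PySem.List.pyRange 0 ((path1.length : Int) - 1) 1).foldl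
      (fun s i => PySem.Set.add s
        (get_edge (PySem.List.pyGetD path1 i 0) (PySem.List.pyGetD path1 (i + 1) 0)))
      PySem.Set.empty
  -- for i in range(len(path2)-1): if get_edge(...) in edges1: return True; return False
  (PySem.List.pyRange 0 ((path2.length : Int) - 1) 1).any
    (fun i => PySem.Set.contains edges1
        (get_edge (PySem.List.pyGetD path2 i 0) (PySem.List.pyGetD path2 (i + 1) 0)))

-- ===== PORT B =====
def normEdge (a : Int) (b : Int) : Int × Int := if a ≤ b then (a, b) else (b, a)

def check_edge_crossing_alt (path1 : List Int) (path2 : List Int) : Bool :=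
  (path1.zip path1.tail).any (fun p =>
    (path2.zip path2.tail).any (fun q => normEdge p.1 p.2 == normEdge q.1 q.2))

-- ===== PRECONDITION & SPEC =====
def Spec_check_edge_crossing (path1 : List Int) (path2 : List Int) (out : Bool) : Prop := out = check_edge_crossing_alt path1 path2
instance (path1 : List Int) (path2 : List Int) (out : Bool) : Decidable (Spec_check_edge_crossing path1 path2 out) := by unfold Spec_check_edge_crossing; infer_instance

-- ===== CLAIM (what is proved, stated in full; the proofs are below) =====
def Claim_equal_check_edge_crossing : Prop := ∀ (path1 : List Int) (path2 : List Int), Dom_check_edge_crossing path1 path2 → Spec_check_edge_crossing path1 path2 (check_edge_crossing path1 path2)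

-- ===== LEMMAS AND PROOFS =====

theorem get_edge_eq_normEdge (a b : Int) : get_edge a b = normEdge a b := by
  unfold get_edge normEdge
  rcases lt_or_ge b a with h | h
  · rw [if_pos h, if_neg (by omega)]
  · rw [if_neg (by omega), if_pos h]

-- membership in the first loop's accumulated set
theorem mem_foldl_add (l : List Int) (s : PySem.Set (Int × Int)) (e : Int × Int)
    (f : Int → Int × Int) :
    (e ∈ l.foldl (fun s i => PySem.Set.add s (f i)) s) ↔ (e ∈ s ∨ ∃ i ∈ l, f i = e) := by
  induction l generalizing s with
  | nil => simp
  | cons x xs ih =>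
      simp only [List.foldl_cons, ih, PySem.Set.mem_add, List.mem_cons]
      constructor
      · intro h
        rcases h with (h | h) | ⟨i, hi, he⟩
        · exact Or.inl h
        · exact Or.inr ⟨x, Or.inl rfl, h.symm⟩
        · exact Or.inr ⟨i, Or.inr hi, he⟩
      · intro h
        rcases h with h | ⟨i, hi, he⟩
        · exact Or.inl (Or.inl h)
        · rcases hi with rfl | hi
          · exact Or.inl (Or.inr he.symm)
          · exact Or.inr ⟨i, hi, he⟩

-- pairs-of-consecutive-elements, indexed form ↔ zip form
theorem mem_zip_tail (l : List Int) (p : Int × Int) :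
    p ∈ l.zip l.tail ↔ ∃ j : Nat, j + 1 < l.length ∧ l.getD j 0 = p.1 ∧ l.getD (j + 1) 0 = p.2 := by
  constructor
  · intro h
    obtain ⟨j, hj, hget⟩ := List.mem_iff_getElem.1 h
    have hjlen : j + 1 < l.length := by
      have := hj
      simp [List.length_zip, List.length_tail] at this
      omega
    refine ⟨j, hjlen, ?_, ?_⟩
    · have : (l.zip l.tail)[j] = (l[j]'(by omega), l.tail[j]'(by simp [List.length_tail]; omega)) := by
        simp [List.getElem_zip]
      rw [this] at hget
      have := congrArg Prod.fst hget
      simp only [List.getD]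
      rw [List.getElem?_eq_getElem (show j < l.length by omega)]
      simpa using this
    · have : (l.zip l.tail)[j] = (l[j]'(by omega), l.tail[j]'(by simp [List.length_tail]; omega)) := by
        simp [List.getElem_zip]
      rw [this] at hget
      have := congrArg Prod.snd hget
      have htail : l.tail[j]'(by simp [List.length_tail]; omega) = l[j+1]'hjlen := by
        simp [List.getElem_tail]
      rw [htail] at this
      simp only [List.getD]
      rw [List.getElem?_eq_getElem hjlen]
      simpa using this
  · rintro ⟨j, hj, h1, h2⟩
    have hzlen : j < (l.zip l.tail).length := by
      simp [List.length_zip, List.length_tail]; omega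
    refine List.mem_iff_getElem.2 ⟨j, hzlen, ?_⟩
    have : (l.zip l.tail)[j] = (l[j]'(by omega), l.tail[j]'(by simp [List.length_tail]; omega)) := by
      simp [List.getElem_zip]
    rw [this]
    have htail : l.tail[j]'(by simp [List.length_tail]; omega) = l[j+1]'hj := by
      simp [List.getElem_tail]
    rw [htail]
    rw [List.getD_eq_getElem l 0 (show j < l.length by omega)] at h1
    rw [List.getD_eq_getElem l 0 hj] at h2
    cases p
    simp_all

-- indexed any over range(len-1) ↔ zip-pairs any
theorem exists_pyRange_pairs (l : List Int) (P : Int → Int → Prop) :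
    (∃ i ∈ PySem.List.pyRange 0 ((l.length : Int) - 1) 1,
        P (PySem.List.pyGetD l i 0) (PySem.List.pyGetD l (i + 1) 0)) ↔
    (∃ p ∈ l.zip l.tail, P p.1 p.2) := by
  constructor
  · rintro ⟨i, hi, hP⟩
    rw [PySem.List.mem_pyRange_one] at hi
    have h0 : 0 ≤ i := hi.1
    have h1 : i < (l.length : Int) - 1 := hi.2
    have hlt : i.toNat + 1 < l.length := by omega
    refine ⟨(l.getD i.toNat 0, l.getD (i.toNat + 1) 0), ?_, ?_⟩
    · exact (mem_zip_tail l _).2 ⟨i.toNat, hlt, rfl, rfl⟩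
    · have e1 : PySem.List.pyGetD l i 0 = l.getD i.toNat 0 := by
        rw [PySem.List.pyGetD_eq_getElem l 0 h0 (by omega)]
        rw [List.getD_eq_getElem l 0 (by omega)]
      have e2 : PySem.List.pyGetD l (i + 1) 0 = l.getD (i.toNat + 1) 0 := by
        rw [PySem.List.pyGetD_eq_getElem l 0 (show (0:Int) ≤ i + 1 by omega) (show i + 1 < (l.length:Int) by omega)]
        rw [List.getD_eq_getElem l 0 (by omega)]
        congr 1
        omega
      rw [e1, e2] at hP
      exact hP
  · rintro ⟨p, hp, hP⟩
    obtain ⟨j, hj, h1, h2⟩ := (mem_zip_tail l p).1 hp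
    refine ⟨(j : Int), ?_, ?_⟩
    · rw [PySem.List.mem_pyRange_one]
      constructor
      · omega
      · omega
    · have e1 : PySem.List.pyGetD l (j : Int) 0 = l.getD j 0 := by
        rw [PySem.List.pyGetD_eq_getElem l 0 (show (0:Int) ≤ (j:Int) by omega) (show (j:Int) < (l.length:Int) by push_cast; omega)]
        rw [List.getD_eq_getElem l 0 (by omega)]
        simp
      have e2 : PySem.List.pyGetD l ((j : Int) + 1) 0 = l.getD (j + 1) 0 := by
        rw [PySem.List.pyGetD_eq_getElem l 0 (show (0:Int) ≤ (j:Int) + 1 by omega) (show (j:Int) + 1 < (l.length:Int) by push_cast; omega)]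
        rw [List.getD_eq_getElem l 0 hj]
        congr 1
      rw [e1, e2, h1, h2]
      exact hP

theorem A_eq_true_iff (path1 path2 : List Int) :
    check_edge_crossing path1 path2 = true ↔
    ∃ q ∈ path2.zip path2.tail, ∃ p ∈ path1.zip path1.tail,
      normEdge p.1 p.2 = normEdge q.1 q.2 := by
  unfold check_edge_crossing
  rw [List.any_eq_true]
  simp only [PySem.Set.contains_iff]
  rw [exists_pyRange_pairs path2 (fun a b =>
      get_edge a b ∈ (PySem.List.pyRange 0 ((path1.length : Int) - 1) 1).foldl
        (fun s i => PySem.Set.add s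
          (get_edge (PySem.List.pyGetD path1 i 0) (PySem.List.pyGetD path1 (i + 1) 0)))
        PySem.Set.empty)]
  constructor
  · rintro ⟨q, hq, hmem⟩
    rw [mem_foldl_add] at hmem
    rcases hmem with h | h
    · simp [PySem.Set.empty] at h
    · obtain ⟨i, hi, he⟩ := (exists_pyRange_pairs path1 (fun a b => get_edge a b = get_edge q.1 q.2)).1 h
      exact ⟨q, hq, i, hi, by simpa [get_edge_eq_normEdge] using he⟩
  · rintro ⟨q, hq, p, hp, he⟩
    refine ⟨q, hq, ?_⟩
    rw [mem_foldl_add]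
    exact Or.inr ((exists_pyRange_pairs path1 (fun a b => get_edge a b = get_edge q.1 q.2)).2
      ⟨p, hp, by simpa [get_edge_eq_normEdge] using he⟩)

theorem B_eq_true_iff (path1 path2 : List Int) :
    check_edge_crossing_alt path1 path2 = true ↔
    ∃ p ∈ path1.zip path1.tail, ∃ q ∈ path2.zip path2.tail,
      normEdge p.1 p.2 = normEdge q.1 q.2 := by
  unfold check_edge_crossing_alt
  simp [List.any_eq_true]

-- ===== VERDICT (by name: the statement is the Claim_ definition above) =====
theorem check_edge_crossing_spec : Claim_equal_check_edge_crossing := by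
  intro path1 path2 _
  unfold Spec_check_edge_crossing
  rw [Bool.eq_iff_iff, A_eq_true_iff, B_eq_true_iff]
  constructor
  · rintro ⟨q, hq, p, hp, h⟩; exact ⟨p, hp, q, hq, h⟩
  · rintro ⟨p, hp, q, hq, h⟩; exact ⟨q, hq, p, hp, h⟩
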